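-- pv_equiv track=rewrite | github.com/MrL314/Project-L | Tools/as65c/assembler.py | make_length_bytes
-- ===== SOURCE A (Python) =====
-- def make_length_bytes(L):
--
-- 	size_bytes = []
--
-- 	while L != 0:
-- 		size_bytes.append(L % 256)
--
-- 		L = L // 256
--
-- 	if len(size_bytes) == 1:
-- 		if size_bytes[0] < 0x80:
-- 			size_bytes[0] = size_bytes[0] | 0x80
-- 		else:
-- 			size_bytes.append(1)
-- 	else:
-- 		size_bytes.append(len(size_bytes))
--
-- 	return [x for x in reversed(size_bytes)]
-- ===== SOURCE B (Python) =====
-- def make_length_bytes(L):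
--     # length-first: count the value bytes, then emit them MSB-first (no reversal)
--     n = 0 if L == 0 else (L.bit_length() + 7) // 8
--     if n == 0:
--         return [0]
--     body = [(L // 256 ** i) % 256 for i in range(n - 1, -1, -1)]
--     if n == 1:
--         b = body[0]
--         return [b | 0x80] if b < 0x80 else [1, b]
--     return [n] + body
-- ===== Notes on version B (the rewrite author's own statement) =====
-- stated objective: alternative
-- what changed: B computes the byte count up front from bit_length and emits the value bytes MSB-first over a descending range, replacing A's LSB-extraction while-loop followed by a list reversal.
import Mathlib
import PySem

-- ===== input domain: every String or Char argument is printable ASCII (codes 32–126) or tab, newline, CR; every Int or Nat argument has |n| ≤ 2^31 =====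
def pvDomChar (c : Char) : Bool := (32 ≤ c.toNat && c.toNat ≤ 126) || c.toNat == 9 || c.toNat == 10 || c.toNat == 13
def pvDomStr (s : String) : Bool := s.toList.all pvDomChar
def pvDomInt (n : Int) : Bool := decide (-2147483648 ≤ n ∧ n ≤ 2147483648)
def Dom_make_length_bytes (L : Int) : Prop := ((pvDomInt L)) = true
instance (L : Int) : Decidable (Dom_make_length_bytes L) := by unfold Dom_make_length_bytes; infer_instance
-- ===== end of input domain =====

-- B changes the decomposition: it computes the byte count from bit_length first and emits the
-- value bytes MSB-first, instead of A's LSB-extraction loop followed by a reversal (objective: alternative).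

-- ===== PORT A =====
-- A's while loop 'while L != 0: append(L % 256); L //= 256'.  For L < 0 the Python loop never
-- terminates (outside Pre_); the guard '0 < L' only totalises the recursion there.
def pvDigitsA (L : Int) : List Int :=
  if _h : 0 < L then
    PySem.Int.mod L 256 :: pvDigitsA (PySem.Int.floordiv L 256)
  else []
termination_by L.toNat
decreasing_by
  rw [PySem.Int.floordiv_eq_ediv_of_pos (by omega : (0:Int) < 256)]
  omega

def make_length_bytes (L : Int) : List Int :=
  let size_bytes := pvDigitsA L
  let size_bytes :=
    if size_bytes.length = 1 then
      if size_bytes.getD 0 0 < 0x80 then [PySem.Int.bor (size_bytes.getD 0 0) 0x80]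
      else size_bytes ++ [1]
    else size_bytes ++ [(size_bytes.length : Int)]
  size_bytes.reverse

-- ===== PORT B =====
-- B from Source B: n = 0 if L == 0 else (L.bit_length()+7)//8; the body is emitted MSB-first over
-- range(n-1,-1,-1).  'i.toNat' in the exponent is exact: every i produced by that range is ≥ 0.
def make_length_bytes_alt (L : Int) : List Int :=
  let n : Int := if L = 0 then 0 else PySem.Int.floordiv ((PySem.Int.bitLength L : Int) + 7) 8
  if n = 0 then [0]
  else
    let body := (PySem.List.pyRange (n - 1) (-1) (-1)).map
      (fun i => PySem.Int.mod (PySem.Int.floordiv L (256 ^ i.toNat)) 256)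
    if n = 1 then
      let b := body.getD 0 0
      if b < 0x80 then [PySem.Int.bor b 0x80] else [1, b]
    else n :: body

-- ===== PRECONDITION & SPEC =====
-- Pre_ excludes L < 0, on which A's while loop never terminates (L // 256 stays negative).
def Pre_make_length_bytes (L : Int) : Prop := 0 ≤ L
instance (L : Int) : Decidable (Pre_make_length_bytes L) := by unfold Pre_make_length_bytes; infer_instance
def pvWitness_make_length_bytes : Int := (300)

def Spec_make_length_bytes (L : Int) (out : List Int) : Prop := out = make_length_bytes_alt L
instance (L : Int) (out : List Int) : Decidable (Spec_make_length_bytes L out) := by unfold Spec_make_length_bytes; infer_instance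

-- ===== CLAIM (what is proved, stated in full; the proofs are below) =====
def Claim_equal_make_length_bytes : Prop := ∀ (L : Int), Dom_make_length_bytes L → Pre_make_length_bytes L → Spec_make_length_bytes L (make_length_bytes L)

-- ===== LEMMAS AND PROOFS =====

-- the byte count B computes, in Nat form
def pvNB (m : Nat) : Nat := (PySem.Int.bitLength (m : Int) + 7) / 8

lemma pv_bl_pos (m : Nat) (h : 0 < m) : 1 ≤ PySem.Int.bitLength (m : Int) := by
  by_contra hc
  have h0 : PySem.Int.bitLength (m : Int) = 0 := by omega
  have hlt := PySem.Int.lt_two_pow_bitLength (m : Int)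
  rw [h0, Int.natAbs_natCast] at hlt
  omega

lemma pv_bl_div256 (m : Nat) (h : 256 ≤ m) :
    PySem.Int.bitLength (m : Int) = PySem.Int.bitLength ((m / 256 : Nat) : Int) + 8 := by
  have e : m / 256 = m / 2 / 2 / 2 / 2 / 2 / 2 / 2 / 2 := by omega
  rw [PySem.Int.bitLength_natCast (by omega : 0 < m),
      PySem.Int.bitLength_natCast (by omega : 0 < m / 2),
      PySem.Int.bitLength_natCast (by omega : 0 < m / 2 / 2),
      PySem.Int.bitLength_natCast (by omega : 0 < m / 2 / 2 / 2),
      PySem.Int.bitLength_natCast (by omega : 0 < m / 2 / 2 / 2 / 2),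
      PySem.Int.bitLength_natCast (by omega : 0 < m / 2 / 2 / 2 / 2 / 2),
      PySem.Int.bitLength_natCast (by omega : 0 < m / 2 / 2 / 2 / 2 / 2 / 2),
      PySem.Int.bitLength_natCast (by omega : 0 < m / 2 / 2 / 2 / 2 / 2 / 2 / 2), e]

lemma pv_bl_le8 (m : Nat) (h1 : 0 < m) (h2 : m < 256) : PySem.Int.bitLength (m : Int) ≤ 8 := by
  have hne : (m : Int) ≠ 0 := by exact_mod_cast h1.ne'
  have hle := PySem.Int.two_pow_bitLength_le (m : Int) hne
  rw [Int.natAbs_natCast] at hle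
  by_contra hc
  have hpow : (2:Nat) ^ 8 ≤ 2 ^ (PySem.Int.bitLength (m : Int) - 1) :=
    Nat.pow_le_pow_right (by omega) (by omega)
  omega

lemma pv_nb_small (m : Nat) (h1 : 0 < m) (h2 : m < 256) : pvNB m = 1 := by
  have := pv_bl_pos m h1
  have := pv_bl_le8 m h1 h2
  unfold pvNB; omega

lemma pv_nb_big (m : Nat) (h : 256 ≤ m) : pvNB m = pvNB (m / 256) + 1 := by
  unfold pvNB
  rw [pv_bl_div256 m h]
  omega

-- characterisation of A's LSB digit list
lemma pv_digits_eq (m : Nat) (h : 0 < m) :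
    pvDigitsA (m : Int) = (List.range (pvNB m)).map (fun i => ((m / 256 ^ i % 256 : Nat) : Int)) := by
  induction m using Nat.strong_induction_on with
  | _ m ih =>
    rw [pvDigitsA, dif_pos (by exact_mod_cast h)]
    have e1 : PySem.Int.mod (m : Int) 256 = ((m % 256 : Nat) : Int) := by
      exact_mod_cast PySem.Int.mod_natCast m 256
    have e2 : PySem.Int.floordiv (m : Int) 256 = ((m / 256 : Nat) : Int) := by
      exact_mod_cast PySem.Int.floordiv_natCast m 256
    rw [e1, e2]
    by_cases hb : m < 256
    · have hd : m / 256 = 0 := Nat.div_eq_of_lt hb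
      rw [hd, pv_nb_small m h hb, pvDigitsA]
      simp [List.range_one]
    · have hb' : 256 ≤ m := by omega
      have hd : 0 < m / 256 := by omega
      rw [ih (m / 256) (by omega) hd, pv_nb_big m hb', List.range_succ_eq_map]
      simp only [List.map_cons, List.map_map]
      congr 1
      · simp
      · apply List.map_congr_left
        intro i _
        simp [Function.comp, Nat.div_div_eq_div_mul, pow_succ, Nat.mul_comm]

lemma pv_digits_len (m : Nat) (h : 0 < m) : (pvDigitsA (m : Int)).length = pvNB m := by
  rw [pv_digits_eq m h]; simp

-- B's MSB body is the reverse of A's LSB digit list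
lemma pv_body_eq (m : Nat) (h : 0 < m) :
    (PySem.List.pyRange ((pvNB m : Int) - 1) (-1) (-1)).map
        (fun i => PySem.Int.mod (PySem.Int.floordiv (m : Int) (256 ^ i.toNat)) 256)
      = (pvDigitsA (m : Int)).reverse := by
  rw [pv_digits_eq m h, PySem.List.pyRange_neg_one]
  have hn : ((pvNB m : Int) - 1 - -1).toNat = pvNB m := by omega
  rw [hn]
  apply List.ext_getElem
  · simp
  · intro j hj1 hj2
    simp only [List.getElem_map, List.getElem_range, List.getElem_reverse, List.length_map,
      List.length_range] at *
    have hjt : ((pvNB m : Int) - 1 - (j : Int)).toNat = pvNB m - 1 - j := by omega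
    rw [hjt]
    have hcast : ((256 : Int) ^ (pvNB m - 1 - j)) = ((256 ^ (pvNB m - 1 - j) : Nat) : Int) := by
      push_cast; ring
    rw [hcast, PySem.Int.floordiv_natCast]
    exact_mod_cast PySem.Int.mod_natCast (m / 256 ^ (pvNB m - 1 - j)) 256

lemma pv_main (m : Nat) : make_length_bytes (m : Int) = make_length_bytes_alt (m : Int) := by
  by_cases h0 : m = 0
  · subst h0
    simp only [make_length_bytes, make_length_bytes_alt, Nat.cast_zero]
    rw [pvDigitsA]
    norm_num
  · have hm : 0 < m := Nat.pos_of_ne_zero h0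
    have hnb : 1 ≤ pvNB m := by have := pv_bl_pos m hm; unfold pvNB; omega
    have hz : ¬ ((m : Int) = 0) := by exact_mod_cast h0
    have hfd : PySem.Int.floordiv ((PySem.Int.bitLength (m : Int) : Int) + 7) 8 = (pvNB m : Int) := by
      rw [PySem.Int.floordiv_eq_ediv_of_pos (by omega : (0:Int) < 8)]
      unfold pvNB
      omega
    simp only [make_length_bytes, make_length_bytes_alt, if_neg hz, hfd]
    have hB0 : ¬ ((pvNB m : Int) = 0) := by exact_mod_cast (show ¬ pvNB m = 0 by omega)
    rw [if_neg hB0, pv_body_eq m hm]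
    have hlen := pv_digits_len m hm
    by_cases hb : m < 256
    · have h1 : pvNB m = 1 := pv_nb_small m hm hb
      have hA1 : (pvDigitsA (m : Int)).length = 1 := by rw [hlen, h1]
      have hB1 : ((pvNB m : Int) = 1) := by exact_mod_cast h1
      rw [if_pos hA1, if_pos hB1]
      have hdig : pvDigitsA (m : Int) = [(m : Int)] := by
        rw [pv_digits_eq m hm, h1]
        simp [List.range_one]
        omega
      rw [hdig]
      simp only [List.reverse_cons, List.reverse_nil, List.nil_append, List.getD, List.getElem?_cons_zero, Option.getD_some]
      split_ifs <;> simp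
    · have hb' : 256 ≤ m := by omega
      have h2 : 2 ≤ pvNB m := by
        rw [pv_nb_big m hb']
        have : 1 ≤ pvNB (m / 256) := by
          have := pv_bl_pos (m / 256) (by omega); unfold pvNB; omega
        omega
      have hA1 : ¬ (pvDigitsA (m : Int)).length = 1 := by rw [hlen]; omega
      have hB1 : ¬ ((pvNB m : Int) = 1) := by exact_mod_cast (show ¬ pvNB m = 1 by omega)
      rw [if_neg hA1, if_neg hB1, hlen]
      simp

-- ===== VERDICT (by name: the statement is the Claim_ definition above) =====
theorem make_length_bytes_spec : Claim_equal_make_length_bytes := by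
  intro L _ hpre
  unfold Spec_make_length_bytes
  obtain ⟨m, rfl⟩ := Int.eq_ofNat_of_zero_le hpre
  exact pv_main m
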